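-- pv_equiv track=rewrite | github.com/PalakGautam-hub/Traffic_Management | ml-service/detector.py | count_vehicles
-- ===== SOURCE A (Python) =====
-- def count_vehicles(detections):
--     """Count vehicles by type."""
--     counts = {"car": 0, "bike": 0, "bus": 0, "truck": 0}
--     for det in detections:
--         label = det["label"]
--         if label in counts:
--             counts[label] += 1
--     counts["total"] = sum(counts.values())
--     return counts
-- ===== SOURCE B (Python) =====
-- def count_vehicles(detections):
--     """Count vehicles by type: one filtering scan per label, then the total."""
--     counts = {k: sum(1 for d in detections if d["label"] == k)
--               for k in ("car", "bike", "bus", "truck")}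
--     counts["total"] = sum(counts.values())
--     return counts
-- ===== Notes on version B (the rewrite author's own statement) =====
-- stated objective: alternative
-- what changed: Replaces A's single accumulating pass that mutates a pre-seeded dict with four independent per-label filtering scans (a dict comprehension), then a total over the computed values.
import Mathlib
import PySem

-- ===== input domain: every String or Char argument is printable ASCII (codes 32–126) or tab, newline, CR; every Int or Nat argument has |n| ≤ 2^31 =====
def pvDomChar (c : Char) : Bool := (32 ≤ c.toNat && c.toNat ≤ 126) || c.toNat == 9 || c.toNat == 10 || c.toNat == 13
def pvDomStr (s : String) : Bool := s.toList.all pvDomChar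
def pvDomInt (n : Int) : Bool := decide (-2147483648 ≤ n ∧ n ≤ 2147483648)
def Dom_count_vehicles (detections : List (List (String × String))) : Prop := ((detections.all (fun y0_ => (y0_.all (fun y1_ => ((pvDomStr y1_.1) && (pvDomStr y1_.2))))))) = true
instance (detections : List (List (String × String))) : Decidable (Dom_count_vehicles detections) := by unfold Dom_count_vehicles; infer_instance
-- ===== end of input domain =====

-- B replaces A's single accumulating pass over a pre-seeded dict with four independent
-- per-label filtering scans plus a total; same cost class, different traversal shape.


-- ===== PORT A =====
-- det["label"] (exact under Pre_, which guarantees the key is present)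
def pvLabel (det : List (String × String)) : String :=
  ((PySem.Dict.ofList det).get? "label").getD ""

def pvStepA (counts : PySem.Dict String Int) (det : List (String × String)) : PySem.Dict String Int :=
  let label := pvLabel det
  if counts.contains label then counts.modify label 0 (· + 1) else counts

def count_vehicles (detections : List (List (String × String))) : List (String × Int) :=
  let counts := detections.foldl pvStepA
    (PySem.Dict.ofList [("car", 0), ("bike", 0), ("bus", 0), ("truck", 0)])
  (counts.insert "total" counts.values.sum).items

-- ===== PORT B =====
def count_vehicles_alt (detections : List (List (String × String))) : List (String × Int) :=
  let counts : List (String × Int) := ["car", "bike", "bus", "truck"].map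
    (fun k => (k, (detections.countP (fun d => pvLabel d == k) : Int)))
  counts ++ [("total", (counts.map Prod.snd).sum)]

-- ===== PRECONDITION & SPEC =====
-- Pre_ excludes exactly the inputs where some detection lacks the key "label": Python A raises KeyError there (and so does B).
def Pre_count_vehicles (detections : List (List (String × String))) : Prop :=
  ∀ det ∈ detections, "label" ∈ det.map Prod.fst
instance (detections : List (List (String × String))) : Decidable (Pre_count_vehicles detections) := by unfold Pre_count_vehicles; infer_instance
def pvWitness_count_vehicles : (List (List (String × String))) :=
  [[("label", "car")], [("label", "dog")], [("label", "bus")]]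

def Spec_count_vehicles (detections : List (List (String × String))) (out : List (String × Int)) : Prop := out = count_vehicles_alt detections
instance (detections : List (List (String × String))) (out : List (String × Int)) : Decidable (Spec_count_vehicles detections out) := by unfold Spec_count_vehicles; infer_instance

-- ===== CLAIM (what is proved, stated in full; the proofs are below) =====
def Claim_equal_count_vehicles : Prop := ∀ (detections : List (List (String × String))), Dom_count_vehicles detections → Pre_count_vehicles detections → Spec_count_vehicles detections (count_vehicles detections)

-- ===== LEMMAS AND PROOFS =====

-- A's loop over a 4-entry literal dict, with the accumulator values generalized.
lemma foldA (dets : List (List (String × String))) : ∀ a b c d : Int,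
    dets.foldl pvStepA (PySem.Dict.mk [("car", a), ("bike", b), ("bus", c), ("truck", d)])
    = PySem.Dict.mk
        [("car",   a + (dets.countP (fun x => pvLabel x == "car")   : Int)),
         ("bike",  b + (dets.countP (fun x => pvLabel x == "bike")  : Int)),
         ("bus",   c + (dets.countP (fun x => pvLabel x == "bus")   : Int)),
         ("truck", d + (dets.countP (fun x => pvLabel x == "truck") : Int))] := by
  induction dets with
  | nil => simp [List.countP]
  | cons x xs ih =>
    intro a b c d
    have hstep : ∀ a b c d : Int,
        pvStepA (PySem.Dict.mk [("car", a), ("bike", b), ("bus", c), ("truck", d)]) x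
        = PySem.Dict.mk
            [("car",   a + if pvLabel x == "car"   then 1 else 0),
             ("bike",  b + if pvLabel x == "bike"  then 1 else 0),
             ("bus",   c + if pvLabel x == "bus"   then 1 else 0),
             ("truck", d + if pvLabel x == "truck" then 1 else 0)] := by
      intro a b c d
      unfold pvStepA
      by_cases h1 : pvLabel x = "car"
      · simp [h1, PySem.Dict.contains, PySem.Dict.modify, PySem.Dict.insert,
              PySem.Dict.getD, PySem.Dict.get?]
      · by_cases h2 : pvLabel x = "bike"
        · simp [h2, PySem.Dict.contains, PySem.Dict.modify, PySem.Dict.insert,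
                PySem.Dict.getD, PySem.Dict.get?]
        · by_cases h3 : pvLabel x = "bus"
          · simp [h3, PySem.Dict.contains, PySem.Dict.modify, PySem.Dict.insert,
                  PySem.Dict.getD, PySem.Dict.get?]
          · by_cases h4 : pvLabel x = "truck"
            · simp [h4, PySem.Dict.contains, PySem.Dict.modify, PySem.Dict.insert,
                    PySem.Dict.getD, PySem.Dict.get?]
            · simp [PySem.Dict.contains, Ne.symm h1, Ne.symm h2, Ne.symm h3, Ne.symm h4]
              exact ⟨h1, h2, h3, h4⟩
    rw [List.foldl_cons, hstep, ih]
    simp only [PySem.Dict.mk.injEq, List.cons.injEq, Prod.mk.injEq, List.countP_cons,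
               true_and, and_true]
    refine ⟨?_, ?_, ?_, ?_⟩ <;> (split_ifs <;> push_cast <;> omega)

-- ===== VERDICT (by name: the statement is the Claim_ definition above) =====
theorem count_vehicles_spec : Claim_equal_count_vehicles := by
  intro dets _ _
  unfold Spec_count_vehicles count_vehicles count_vehicles_alt
  have h0 : (PySem.Dict.ofList [("car", (0:Int)), ("bike", 0), ("bus", 0), ("truck", 0)])
      = PySem.Dict.mk [("car", 0), ("bike", 0), ("bus", 0), ("truck", 0)] := by decide
  rw [h0, foldA]
  simp [PySem.Dict.insert, PySem.Dict.contains, PySem.Dict.values,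
        List.map, List.countP]
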